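-- pv_equiv track=rewrite | github.com/Winters0727/Python-Algorithm-Interview | Kakao Blind Recruitment 2020/buyJewel.py | solution
-- ===== SOURCE A (Python) =====
-- from collections import defaultdict
--
-- def solution(gems):
--     length = len(gems)
--     answer = [1, 1]
--     gems_dict = defaultdict(int)
--     gems_length = len(gems_dict.keys())
--     for idx, gem in enumerate(gems):
--         gems_dict[gem] = idx
--         temp_length = len(gems_dict.keys())
--         if temp_length > 1:
--             min_val, max_val = min(gems_dict.values())+1, max(gems_dict.values())+1
--             if temp_length > gems_length or (max_val - min_val) < (answer[1] - answer[0]):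
--                 gems_length = temp_length
--                 answer = [min_val, max_val]
--     return answer
-- ===== SOURCE B (Python) =====
-- def solution(gems):
--     n = len(gems)
--     # nxt[j] = next index after j holding the same gem, or n if none
--     nxt = [n] * n
--     first = {}
--     for j in range(n - 1, -1, -1):
--         nxt[j] = first.get(gems[j], n)
--         first[gems[j]] = j
--     if not first:
--         return [1, 1]
--     c = max(first.values())  # first index at which every kind has appeared
--     best = None
--     left = 0
--     for i in range(c, n):
--         while nxt[left] <= i:
--             left += 1
--         if best is None or i - left < best[1] - best[0]:
--             best = (left, i)
--     return [best[0] + 1, best[1] + 1]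
-- ===== Notes on version B (the rewrite author's own statement) =====
-- stated objective: faster
-- what changed: replaces the per-index min/max scan over the last-occurrence dict by a precomputed next-occurrence array with a monotonically advancing left pointer, iterating only over the suffix where all kinds have appeared
import Mathlib
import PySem

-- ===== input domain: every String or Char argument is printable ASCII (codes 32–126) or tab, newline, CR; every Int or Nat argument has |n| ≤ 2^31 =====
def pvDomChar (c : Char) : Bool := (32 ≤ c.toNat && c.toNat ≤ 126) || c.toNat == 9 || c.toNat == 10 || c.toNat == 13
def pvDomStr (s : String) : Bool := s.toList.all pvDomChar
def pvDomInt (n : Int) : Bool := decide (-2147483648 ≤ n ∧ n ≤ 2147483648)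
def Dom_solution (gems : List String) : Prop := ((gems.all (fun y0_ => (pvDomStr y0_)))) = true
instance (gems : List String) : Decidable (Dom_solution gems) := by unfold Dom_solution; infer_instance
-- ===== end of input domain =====

-- B replaces A's per-index min/max scan over the last-occurrence dict by a precomputed
-- next-occurrence array and a monotone left pointer (objective: faster, asymptotically).

-- ===== PORT A =====
-- state: (answer, gems_dict, gems_length); 'length' of A is unused; len(keys of empty dict) = 0
def solution (gems : List String) : List Int :=
  let st := (PySem.List.enumerate gems 0).foldl
    (fun (st : List Int × PySem.Dict String Int × Int) p =>
      let answer := st.1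
      let d := st.2.1.insert p.2 p.1                      -- gems_dict[gem] = idx
      let temp := PySem.List.len d.keys                   -- temp_length
      if 1 < temp then
        let minv := ((PySem.List.min? d.values (fun v => v)).getD 0) + 1
        let maxv := ((PySem.List.max? d.values (fun v => v)).getD 0) + 1
        if st.2.2 < temp ∨
            maxv - minv < PySem.List.pyGetD answer 1 0 - PySem.List.pyGetD answer 0 0 then
          ([minv, maxv], d, temp)
        else (answer, d, st.2.2)
      else (answer, d, st.2.2))
    ([1, 1], PySem.Dict.empty, 0)
  st.1

-- ===== PORT B =====
-- while nxt[left] <= i: left += 1   (fuel is only a totality guard; the loop stops before it runs out)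
def shrinkLeft (nxt : List Int) (i : Int) (left : Int) (fuel : Nat) : Int :=
  match fuel with
  | 0 => left
  | f + 1 => if PySem.List.pyGetD nxt left 0 ≤ i then shrinkLeft nxt i (left + 1) f else left

def solution_alt (gems : List String) : List Int :=
  let n : Int := PySem.List.len gems
  -- backward pass: nxt[j] = next index of the same gem (n if none); first = first occurrence of each gem
  let bw := (PySem.List.pyRange (n - 1) (-1) (-1)).foldl
    (fun (st : List Int × PySem.Dict String Int) j =>
      let g := PySem.List.pyGetD gems j ""
      (PySem.List.pySetD st.1 j (st.2.getD g n), st.2.insert g j))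
    (List.replicate gems.length n, PySem.Dict.empty)
  let nxt := bw.1
  let first := bw.2
  if first.items = [] then [1, 1]
  else
    let c := (PySem.List.max? first.values (fun v => v)).getD 0   -- first index where every kind has appeared
    let st := (PySem.List.pyRange c n 1).foldl
      (fun (st : Option (Int × Int) × Int) i =>
        let left := shrinkLeft nxt i st.2 (gems.length + 1)
        match st.1 with
        | none => (some (left, i), left)
        | some b => if i - left < b.2 - b.1 then (some (left, i), left) else (some b, left))
      (none, 0)
    match st.1 with
    | some b => [b.1 + 1, b.2 + 1]
    | none => [1, 1]

-- ===== PRECONDITION & SPEC =====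
def Spec_solution (gems : List String) (out : List Int) : Prop := out = solution_alt gems
instance (gems : List String) (out : List Int) : Decidable (Spec_solution gems out) := by unfold Spec_solution; infer_instance

-- ===== CLAIM (what is proved, stated in full; the proofs are below) =====
def Claim_equal_solution : Prop := ∀ (gems : List String), Dom_solution gems → Spec_solution gems (solution gems)

-- ===== LEMMAS AND PROOFS =====
theorem find?_range_least {P : Nat → Bool} {N k : Nat}
    (h : (List.range N).find? P = some k) : P k = true ∧ k < N ∧ ∀ j < k, P j = false := by
  have hk := List.find?_some h
  have hmem := List.mem_of_find?_eq_some h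
  have hkN : k < N := List.mem_range.mp hmem
  refine ⟨hk, hkN, ?_⟩
  rw [List.find?_eq_some_iff_append] at h
  obtain ⟨-, as, bs, hsplit, hnone⟩ := h
  have hlen : as.length < N := by
    have := congrArg List.length hsplit
    simp at this; omega
  have hkval : k = as.length := by
    have this : (List.range N)[as.length]? = (as ++ k :: bs)[as.length]? := by rw [hsplit]
    rw [List.getElem?_range hlen, List.getElem?_append_right (le_refl _)] at this
    simp at this
    omega
  intro j hj
  have hjas : j ∈ as := by
    have hjN : j < N := by omega
    have this : (List.range N)[j]? = (as ++ k :: bs)[j]? := by rw [hsplit]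
    rw [List.getElem?_append_left (by omega), List.getElem?_range hjN] at this
    exact List.mem_of_getElem? this.symm
  simpa using hnone j hjas

theorem find?_range_isSome {P : Nat → Bool} {N j : Nat} (hj : j < N) (hP : P j = true) :
    ((List.range N).find? P).isSome := by
  rw [List.find?_isSome]
  exact ⟨j, List.mem_range.mpr hj, hP⟩

theorem min?_id_eq_of_mem_of_le {xs : List Int} {x : Int} (hx : x ∈ xs)
    (hle : ∀ y ∈ xs, x ≤ y) : PySem.List.min? xs (fun v => v) = some x := by
  have hne : xs ≠ [] := List.ne_nil_of_mem hx
  obtain ⟨z, hz⟩ : ∃ z, PySem.List.min? xs (fun v => v) = some z := by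
    cases hmz : PySem.List.min? xs (fun v => v) with
    | none => exact absurd ((PySem.List.min?_eq_none_iff xs _).mp hmz) hne
    | some z => exact ⟨z, rfl⟩
  have hzmem := PySem.List.min?_mem hz
  have hzmin := PySem.List.min?_isMin hz x hx
  have := hle z hzmem
  rw [hz]; congr 1; omega

theorem max?_id_eq_of_mem_of_le {xs : List Int} {x : Int} (hx : x ∈ xs)
    (hle : ∀ y ∈ xs, y ≤ x) : PySem.List.max? xs (fun v => v) = some x := by
  have hne : xs ≠ [] := List.ne_nil_of_mem hx
  obtain ⟨z, hz⟩ : ∃ z, PySem.List.max? xs (fun v => v) = some z := by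
    cases hmz : PySem.List.max? xs (fun v => v) with
    | none => exact absurd ((PySem.List.max?_eq_none_iff xs _).mp hmz) hne
    | some z => exact ⟨z, rfl⟩
  have hzmem := PySem.List.max?_mem hz
  have hzmax := PySem.List.max?_isMax hz x hx
  have := hle z hzmem
  rw [hz]; congr 1; omega

theorem index?_lt_of_mem_take {l : List String} {g : String} {k t : Nat}
    (h : PySem.List.index? l g = some k) (hmem : g ∈ l.take t) : k < t := by
  obtain ⟨hk, hget, hfirst⟩ := PySem.List.getElem_of_index?_eq_some h
  obtain ⟨p, hp, hpg⟩ := List.getElem_of_mem hmem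
  have hpt : p < t := by have := hp; simp [List.length_take] at this; omega
  rw [List.getElem_take] at hpg
  by_contra hc
  push_neg at hc
  exact hfirst p (by omega) hpg

def nxtSpec (gems : List String) (j : Nat) : Nat :=
  match PySem.List.index? (gems.drop (j + 1)) (gems.getD j "") with
  | some k => j + 1 + k
  | none => gems.length

theorem lt_nxtSpec (gems : List String) (j : Nat) (hj : j < gems.length) : j < nxtSpec gems j := by
  unfold nxtSpec
  cases PySem.List.index? (gems.drop (j + 1)) (gems.getD j "") <;> simp <;> omega

theorem nxtSpec_le_of_eq (gems : List String) {j m : Nat} (hjm : j < m) (hm : m < gems.length)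
    (h : gems.getD j "" = gems.getD m "") : nxtSpec gems j ≤ m := by
  have hmem : gems.getD j "" ∈ (gems.drop (j + 1)).take (m - j) := by
    have hlen : m - (j + 1) < ((gems.drop (j + 1)).take (m - j)).length := by
      simp [List.length_take]; omega
    have : ((gems.drop (j + 1)).take (m - j))[m - (j + 1)]'hlen = gems.getD m "" := by
      rw [List.getElem_take, List.getElem_drop, List.getD_eq_getElem gems "" (by omega)]
      congr 1; omega
    rw [h, ← this]
    exact List.getElem_mem _
  unfold nxtSpec
  cases hidx : PySem.List.index? (gems.drop (j + 1)) (gems.getD j "") with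
  | none =>
    exact absurd ((PySem.List.index?_eq_none_iff _ _).mp hidx)
      (by simpa using List.mem_of_mem_take hmem)
  | some k =>
    have hk := index?_lt_of_mem_take hidx hmem
    simp only
    omega

theorem getD_nxtSpec (gems : List String) {j : Nat} (h : nxtSpec gems j < gems.length) :
    gems.getD (nxtSpec gems j) "" = gems.getD j "" := by
  unfold nxtSpec at *
  cases hidx : PySem.List.index? (gems.drop (j + 1)) (gems.getD j "") with
  | none => rw [hidx] at h; simp at h
  | some k =>
    rw [hidx] at h
    obtain ⟨hkl, hget, -⟩ := PySem.List.getElem_of_index?_eq_some hidx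
    simp only
    rw [List.getElem_drop] at hget
    rw [List.getD_eq_getElem gems "" (by simpa using h)]
    exact hget

def minIdx (gems : List String) (i : Nat) : Nat :=
  ((List.range (i + 1)).find? (fun j => decide (i < nxtSpec gems j))).getD 0

theorem minIdx_spec (gems : List String) (i : Nat) (hi : i < gems.length) :
    minIdx gems i ≤ i ∧ i < nxtSpec gems (minIdx gems i) ∧
      ∀ j < minIdx gems i, nxtSpec gems j ≤ i := by
  have hs := find?_range_isSome (P := fun j => decide (i < nxtSpec gems j)) (N := i + 1)
    (j := i) (by omega) (decide_eq_true (lt_nxtSpec gems i hi))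
  obtain ⟨k, hk⟩ := Option.isSome_iff_exists.mp hs
  obtain ⟨hPk, hkN, hleast⟩ := find?_range_least hk
  have hmi : minIdx gems i = k := by unfold minIdx; rw [hk]; rfl
  rw [hmi]
  refine ⟨by omega, by simpa using hPk, fun j hj => ?_⟩
  have := hleast j hj
  simp at this
  omega

theorem minIdx_le (gems : List String) (i : Nat) (hi : i < gems.length) : minIdx gems i ≤ i :=
  (minIdx_spec gems i hi).1

theorem lt_nxtSpec_minIdx (gems : List String) (i : Nat) (hi : i < gems.length) :
    i < nxtSpec gems (minIdx gems i) := (minIdx_spec gems i hi).2.1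

theorem nxtSpec_le_of_lt_minIdx (gems : List String) {i j : Nat} (hi : i < gems.length)
    (hj : j < minIdx gems i) : nxtSpec gems j ≤ i := (minIdx_spec gems i hi).2.2 j hj

theorem minIdx_mono (gems : List String) {i : Nat} (hi : i + 1 < gems.length) :
    minIdx gems i ≤ minIdx gems (i + 1) := by
  by_contra hc
  push_neg at hc
  have h1 := nxtSpec_le_of_lt_minIdx gems (i := i) (by omega) hc
  have h2 := lt_nxtSpec_minIdx gems (i + 1) hi
  omega

def distinctN (gems : List String) (m : Nat) : Nat := (PySem.Set.ofList (gems.take m)).length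

theorem distinctN_succ (gems : List String) {m : Nat} (hm : m < gems.length) :
    distinctN gems (m + 1) =
      if gems.getD m "" ∈ gems.take m then distinctN gems m else distinctN gems m + 1 := by
  unfold distinctN
  rw [List.take_succ, List.getElem?_eq_getElem hm]
  simp only [Option.toList_some]
  rw [PySem.Set.ofList_append_singleton, PySem.Set.add_eq_ite]
  rw [List.getD_eq_getElem gems "" hm]
  by_cases h : gems[m] ∈ gems.take m
  · rw [if_pos ((PySem.Set.mem_ofList _ _).mpr h), if_pos h]
  · rw [if_neg (fun hc => h ((PySem.Set.mem_ofList _ _).mp hc)), if_neg h]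
    simp

theorem distinctN_mono (gems : List String) {m m' : Nat} (h : m ≤ m') :
    distinctN gems m ≤ distinctN gems m' := by
  unfold distinctN
  have : gems.take m' = gems.take m ++ (gems.drop m).take (m' - m) := by
    rw [← List.take_add]
    congr 1; omega
  rw [this, PySem.Set.ofList_append, PySem.Set.update_eq_append_filter]
  simp

theorem distinctN_le_total (gems : List String) (m : Nat) :
    distinctN gems m ≤ distinctN gems gems.length := by
  by_cases h : m ≤ gems.length
  · exact distinctN_mono gems h
  · unfold distinctN
    rw [List.take_of_length_le (by omega), List.take_length]

theorem distinctN_one (gems : List String) (h : gems ≠ []) : distinctN gems 1 = 1 := by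
  cases gems with
  | nil => exact absurd rfl h
  | cons x t => simp [distinctN, PySem.Set.ofList]

theorem distinctN_pos (gems : List String) (h : gems ≠ []) :
    1 ≤ distinctN gems gems.length := by
  have := distinctN_le_total gems 1
  rw [distinctN_one gems h] at this
  omega

theorem mem_take_of_distinct_eq (gems : List String) {m : Nat}
    (h : distinctN gems m = distinctN gems gems.length) {g : String} (hg : g ∈ gems) :
    g ∈ gems.take m := by
  classical
  have hsn := PySem.Set.nodup_ofList (gems.take m)
  have htn := PySem.Set.nodup_ofList gems
  have hsub : (PySem.Set.ofList (gems.take m)).toFinset ⊆ (PySem.Set.ofList gems).toFinset := by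
    intro x hx
    rw [List.mem_toFinset] at hx ⊢
    exact (PySem.Set.mem_ofList _ _).mpr (List.mem_of_mem_take ((PySem.Set.mem_ofList _ _).mp hx))
  have hcard : (PySem.Set.ofList gems).toFinset.card ≤ (PySem.Set.ofList (gems.take m)).toFinset.card := by
    rw [List.toFinset_card_of_nodup hsn, List.toFinset_card_of_nodup htn]
    unfold distinctN at h
    rw [List.take_length] at h
    omega
  have heq := Finset.eq_of_subset_of_card_le hsub hcard
  have : g ∈ (PySem.Set.ofList (gems.take m)).toFinset := by
    rw [heq, List.mem_toFinset]
    exact (PySem.Set.mem_ofList _ _).mpr hg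
  rw [List.mem_toFinset] at this
  exact (PySem.Set.mem_ofList _ _).mp this

def cSpec (gems : List String) : Nat :=
  ((List.range gems.length).find?
    (fun m => distinctN gems (m + 1) == distinctN gems gems.length)).getD 0

theorem cSpec_spec (gems : List String) (h : gems ≠ []) :
    cSpec gems < gems.length ∧
      distinctN gems (cSpec gems + 1) = distinctN gems gems.length ∧
      ∀ m < cSpec gems, distinctN gems (m + 1) ≠ distinctN gems gems.length := by
  have hn : 1 ≤ gems.length := List.length_pos_of_ne_nil h
  have hw : distinctN gems (gems.length - 1 + 1) = distinctN gems gems.length := by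
    congr 1; omega
  have hs := find?_range_isSome
    (P := fun m => distinctN gems (m + 1) == distinctN gems gems.length)
    (N := gems.length) (j := gems.length - 1) (by omega) (by simpa using hw)
  obtain ⟨k, hk⟩ := Option.isSome_iff_exists.mp hs
  obtain ⟨hPk, hkN, hleast⟩ := find?_range_least hk
  have hc : cSpec gems = k := by unfold cSpec; rw [hk]; rfl
  rw [hc]
  refine ⟨hkN, by simpa using hPk, fun m hm => ?_⟩
  have := hleast m hm
  simpa using this

theorem cSpec_lt (gems : List String) (h : gems ≠ []) : cSpec gems < gems.length :=
  (cSpec_spec gems h).1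

theorem distinctN_cSpec (gems : List String) (h : gems ≠ []) :
    distinctN gems (cSpec gems + 1) = distinctN gems gems.length :=
  (cSpec_spec gems h).2.1

theorem distinctN_eq_of_cSpec_le (gems : List String) {m : Nat} (h : gems ≠ [])
    (hm : cSpec gems ≤ m) : distinctN gems (m + 1) = distinctN gems gems.length := by
  have h1 := distinctN_cSpec gems h
  have h2 := distinctN_mono gems (m := cSpec gems + 1) (m' := m + 1) (by omega)
  have h3 := distinctN_le_total gems (m + 1)
  omega

theorem cSpec_pos (gems : List String) (h : gems ≠ [])
    (hK : 2 ≤ distinctN gems gems.length) : 1 ≤ cSpec gems := by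
  by_contra hc
  have h0 : cSpec gems = 0 := by omega
  have := distinctN_cSpec gems h
  rw [h0, distinctN_one gems h] at this
  omega

theorem distinctN_cSpec_lt (gems : List String) (h : gems ≠ [])
    (hK : 2 ≤ distinctN gems gems.length) :
    distinctN gems (cSpec gems) < distinctN gems gems.length := by
  have hp := cSpec_pos gems h hK
  have hle := distinctN_le_total gems (cSpec gems)
  rcases Nat.lt_or_ge (distinctN gems (cSpec gems)) (distinctN gems gems.length) with hlt | hge
  · exact hlt
  · exfalso
    have heq : distinctN gems (cSpec gems - 1 + 1) = distinctN gems gems.length := by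
      have : cSpec gems - 1 + 1 = cSpec gems := by omega
      rw [this]; omega
    exact (cSpec_spec gems h).2.2 (cSpec gems - 1) (by omega) heq

theorem not_mem_take_cSpec (gems : List String) (h : gems ≠ []) :
    gems.getD (cSpec gems) "" ∉ gems.take (cSpec gems) := by
  by_cases h0 : cSpec gems = 0
  · rw [h0]; simp
  · have hK : 2 ≤ distinctN gems gems.length := by
      have h1 := (cSpec_spec gems h).2.2 0 (by omega)
      rw [distinctN_one gems h] at h1
      have := distinctN_le_total gems 1
      rw [distinctN_one gems h] at this
      omega
    have hlt := distinctN_cSpec_lt gems h hK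
    have hsucc := distinctN_succ gems (m := cSpec gems) (cSpec_lt gems h)
    have heq := distinctN_cSpec gems h
    intro hmem
    rw [if_pos hmem] at hsucc
    omega

def dictA (gems : List String) (m : Nat) : PySem.Dict String Int :=
  (PySem.List.enumerate (gems.take m) 0).foldl (fun d p => d.insert p.2 p.1) PySem.Dict.empty

theorem dictA_succ (gems : List String) {m : Nat} (hm : m < gems.length) :
    dictA gems (m + 1) = (dictA gems m).insert (gems.getD m "") (m : Int) := by
  unfold dictA
  rw [List.take_add_one, List.getElem?_eq_getElem hm]
  simp only [Option.toList_some]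
  rw [PySem.List.enumerate_append, List.foldl_append]
  have hlen : (gems.take m).length = m := by simp [List.length_take]; omega
  rw [hlen]
  simp [PySem.List.enumerate_cons, PySem.List.enumerate_nil,
    List.getD_eq_getElem?_getD, List.getElem?_eq_getElem hm]

theorem dictA_keys (gems : List String) (m : Nat) :
    (dictA gems m).keys = PySem.Set.ofList (gems.take m) := by
  unfold dictA
  have h := PySem.Dict.keys_foldl_insert_key (PySem.List.enumerate (gems.take m) 0)
    (fun p => p.2) (fun _ p => p.1) PySem.Dict.empty
  rw [h, PySem.List.map_snd_enumerate]
  exact PySem.Set.update_empty _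

theorem dictA_nodup (gems : List String) (m : Nat) : (dictA gems m).keys.Nodup := by
  rw [dictA_keys]
  exact PySem.Set.nodup_ofList _

theorem dictA_get? (gems : List String) {m : Nat} (hm : m ≤ gems.length) (g : String) (v : Int) :
    (dictA gems m).get? g = some v ↔
      ∃ j : Nat, v = (j : Int) ∧ j < m ∧ gems.getD j "" = g ∧ m ≤ nxtSpec gems j := by
  induction m with
  | zero =>
    simp [dictA, PySem.List.enumerate_nil, PySem.Dict.get?_empty]
  | succ m ih =>
    rw [dictA_succ gems (by omega), PySem.Dict.get?_insert]
    by_cases hg : g = gems.getD m ""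
    · rw [if_pos hg]
      constructor
      · rintro h
        refine ⟨m, by simpa using h.symm, by omega, hg.symm, lt_nxtSpec gems m (by omega)⟩
      · rintro ⟨j, hv, hj, hgj, hnx⟩
        rcases Nat.lt_or_ge j m with hjm | hjm
        · exfalso
          have := nxtSpec_le_of_eq gems hjm (by omega) (by rw [hgj, hg])
          omega
        · have : j = m := by omega
          rw [hv, this]
    · rw [if_neg hg, ih (by omega)]
      constructor
      · rintro ⟨j, hv, hj, hgj, hnx⟩
        refine ⟨j, hv, by omega, hgj, ?_⟩
        rcases Nat.lt_or_ge (nxtSpec gems j) (m + 1) with hlt | hge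
        · exfalso
          have hnm : nxtSpec gems j = m := by omega
          have := getD_nxtSpec gems (j := j) (by omega)
          rw [hnm] at this
          exact hg (by rw [← hgj, ← this])
        · exact hge
      · rintro ⟨j, hv, hj, hgj, hnx⟩
        have hjm : j ≠ m := fun hc => hg (by rw [← hgj, hc])
        exact ⟨j, hv, by omega, hgj, by omega⟩

theorem dictA_values_mem (gems : List String) {m : Nat} (hm : m ≤ gems.length) (v : Int) :
    v ∈ (dictA gems m).values ↔ ∃ j : Nat, v = (j : Int) ∧ j < m ∧ m ≤ nxtSpec gems j := by
  have hvals : (dictA gems m).values = (dictA gems m).items.map (·.2) := rfl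
  rw [hvals, List.mem_map]
  constructor
  · rintro ⟨p, hp, hpv⟩
    have hget := PySem.Dict.get?_of_mem_items _ (by rwa [← Prod.mk.eta (p := p)] at hp)
      (dictA_nodup gems m)
    rw [hpv] at hget
    obtain ⟨j, hv, hj, -, hnx⟩ := (dictA_get? gems hm p.1 v).mp hget
    exact ⟨j, hv, hj, hnx⟩
  · rintro ⟨j, hv, hj, hnx⟩
    have hget : (dictA gems m).get? (gems.getD j "") = some v :=
      (dictA_get? gems hm _ v).mpr ⟨j, hv, hj, rfl, hnx⟩
    exact ⟨(gems.getD j "", v), PySem.Dict.mem_items_of_get?_eq_some _ hget, rfl⟩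

theorem dictA_min (gems : List String) {m : Nat} (hm : m < gems.length) :
    PySem.List.min? (dictA gems (m + 1)).values (fun v => v) = some ((minIdx gems m : Nat) : Int) := by
  apply min?_id_eq_of_mem_of_le
  · rw [dictA_values_mem gems (by omega)]
    exact ⟨minIdx gems m, rfl, by have := minIdx_le gems m hm; omega,
      by have := lt_nxtSpec_minIdx gems m hm; omega⟩
  · intro y hy
    obtain ⟨j, hv, hj, hnx⟩ := (dictA_values_mem gems (by omega) y).mp hy
    rcases Nat.lt_or_ge j (minIdx gems m) with hlt | hge
    · exfalso
      have := nxtSpec_le_of_lt_minIdx gems hm hlt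
      omega
    · rw [hv]; exact_mod_cast hge

theorem dictA_max (gems : List String) {m : Nat} (hm : m < gems.length) :
    PySem.List.max? (dictA gems (m + 1)).values (fun v => v) = some ((m : Nat) : Int) := by
  apply max?_id_eq_of_mem_of_le
  · rw [dictA_values_mem gems (by omega)]
    exact ⟨m, rfl, by omega, by have := lt_nxtSpec gems m hm; omega⟩
  · intro y hy
    obtain ⟨j, hv, hj, hnx⟩ := (dictA_values_mem gems (by omega) y).mp hy
    rw [hv]
    have : j ≤ m := by omega
    exact_mod_cast this

def bestF (gems : List String) (c : Nat) : Nat → Int × Int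
  | 0 => ((minIdx gems c : Int), (c : Int))
  | m + 1 =>
    let prev := bestF gems c m
    let i := c + (m + 1)
    let l := minIdx gems i
    if (i : Int) - (l : Int) < prev.2 - prev.1 then ((l : Int), (i : Int)) else prev

def aStep (gems : List String) (i : Nat) (st : List Int × Int) : List Int × Int :=
  let t : Int := (distinctN gems (i + 1) : Int)
  if 1 < t then
    if st.2 < t ∨
        ((i : Int) + 1) - ((minIdx gems i : Int) + 1) <
          PySem.List.pyGetD st.1 1 0 - PySem.List.pyGetD st.1 0 0 then
      ([(minIdx gems i : Int) + 1, (i : Int) + 1], t)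
    else st
  else st

def aAbs (gems : List String) : Nat → List Int × Int
  | 0 => aStep gems 0 ([1, 1], 0)
  | m + 1 => aStep gems (m + 1) (aAbs gems m)

def aBody (st : List Int × PySem.Dict String Int × Int) (p : Int × String) :
    List Int × PySem.Dict String Int × Int :=
  let answer := st.1
  let d := st.2.1.insert p.2 p.1
  let temp := PySem.List.len d.keys
  if 1 < temp then
    let minv := ((PySem.List.min? d.values (fun v => v)).getD 0) + 1
    let maxv := ((PySem.List.max? d.values (fun v => v)).getD 0) + 1
    if st.2.2 < temp ∨
        maxv - minv < PySem.List.pyGetD answer 1 0 - PySem.List.pyGetD answer 0 0 then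
      ([minv, maxv], d, temp)
    else (answer, d, st.2.2)
  else (answer, d, st.2.2)

theorem aBody_step (gems : List String) {i : Nat} (hi : i < gems.length)
    (ans : List Int) (gl : Int) :
    aBody (ans, dictA gems i, gl) ((i : Int), gems.getD i "") =
      ((aStep gems i (ans, gl)).1, dictA gems (i + 1), (aStep gems i (ans, gl)).2) := by
  unfold aBody aStep
  simp only
  rw [← dictA_succ gems hi]
  have hkeys : PySem.List.len (dictA gems (i + 1)).keys = (distinctN gems (i + 1) : Int) := by
    rw [PySem.List.len_eq, dictA_keys]
    rfl
  rw [hkeys, dictA_min gems hi, dictA_max gems hi]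
  simp only [Option.getD_some]
  by_cases h1 : (1 : Int) < (distinctN gems (i + 1) : Int)
  · rw [if_pos h1, if_pos h1]
    by_cases h2 : gl < (distinctN gems (i + 1) : Int) ∨
        ((i : Int) + 1) - ((minIdx gems i : Int) + 1) <
          PySem.List.pyGetD ans 1 0 - PySem.List.pyGetD ans 0 0
    · rw [if_pos h2, if_pos h2]
    · rw [if_neg h2, if_neg h2]
  · rw [if_neg h1, if_neg h1]

theorem aAbs_spec (gems : List String) {m : Nat} (hm : m < gems.length) :
    (PySem.List.enumerate (gems.take (m + 1)) 0).foldl aBody ([1, 1], PySem.Dict.empty, 0)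
    = ((aAbs gems m).1, dictA gems (m + 1), (aAbs gems m).2) := by
  induction m with
  | zero =>
    rw [List.take_add_one, List.getElem?_eq_getElem hm]
    simp only [List.take_zero, Option.toList_some, List.nil_append]
    rw [show PySem.List.enumerate [gems[0]] 0 = [((0 : Int), gems[0])] by rfl]
    rw [List.foldl_cons, List.foldl_nil]
    have h0 : ((0 : Int), gems[0]) = ((((0:Nat) : Int)), gems.getD 0 "") := by
      rw [List.getD_eq_getElem gems "" hm]
      simp
    rw [h0]
    have := aBody_step gems (i := 0) hm [1, 1] 0
    rw [show (dictA gems 0) = PySem.Dict.empty from rfl] at this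
    rw [this]
    rfl
  | succ m ih =>
    rw [List.take_add_one, List.getElem?_eq_getElem hm]
    simp only [Option.toList_some]
    rw [PySem.List.enumerate_append, List.foldl_append]
    rw [ih (by omega)]
    have hlen : (gems.take (m + 1)).length = m + 1 := by simp [List.length_take]; omega
    rw [hlen]
    have h1 : PySem.List.enumerate [gems[m + 1]] (0 + (((m+1:Nat)) : Int)) =
        [((((m+1:Nat)) : Int), gems.getD (m + 1) "")] := by
      rw [List.getD_eq_getElem gems "" hm]
      simp [PySem.List.enumerate_cons, PySem.List.enumerate_nil]
    rw [h1, List.foldl_cons, List.foldl_nil]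
    rw [aBody_step gems (i := m + 1) hm]
    rfl

theorem aAbs_gl (gems : List String) {m : Nat} (hm : m < gems.length) :
    (aAbs gems m).2 =
      if distinctN gems (m + 1) ≤ 1 then 0 else (distinctN gems (m + 1) : Int) := by
  induction m with
  | zero =>
    have hne : gems ≠ [] := by intro hc; rw [hc] at hm; simp at hm
    have h1 := distinctN_one gems hne
    simp only [aAbs, aStep, h1]
    norm_num
  | succ m ih =>
    have ih := ih (by omega)
    show (aStep gems (m + 1) (aAbs gems m)).2 = _
    unfold aStep
    simp only
    set t := distinctN gems (m + 2) with ht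
    have hmono : distinctN gems (m + 1) ≤ t := distinctN_mono gems (by omega)
    by_cases h1 : (1 : Int) < (t : Int)
    · rw [if_pos h1]
      by_cases h2 : (aAbs gems m).2 < (t : Int) ∨
          ((m + 1 : Nat) : Int) + 1 - ((minIdx gems (m + 1) : Int) + 1) <
            PySem.List.pyGetD (aAbs gems m).1 1 0 - PySem.List.pyGetD (aAbs gems m).1 0 0
      · rw [if_pos h2]
        simp only
        rw [if_neg (by omega)]
      · rw [if_neg h2]
        push_neg at h2
        obtain ⟨h2a, -⟩ := h2
        rw [ih] at h2a ⊢
        split at h2a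
        · exfalso; omega
        · have h3 : t ≤ distinctN gems (m + 1) := by exact_mod_cast h2a
          have h4 : t = distinctN gems (m + 1) := by omega
          rw [h4, if_neg (by omega)]
    · rw [if_neg h1, ih]
      have htle : t ≤ 1 := by exact_mod_cast Int.not_lt.mp h1
      rw [if_pos (by omega), if_pos (by omega)]

theorem aAbs_low (gems : List String) {m : Nat} (hm : m < gems.length)
    (hK : distinctN gems gems.length ≤ 1) : aAbs gems m = ([1, 1], 0) := by
  induction m with
  | zero =>
    have hne : gems ≠ [] := by intro hc; rw [hc] at hm; simp at hm
    simp only [aAbs, aStep, distinctN_one gems hne]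
    norm_num
  | succ m ih =>
    show aStep gems (m + 1) (aAbs gems m) = _
    rw [ih (by omega)]
    unfold aStep
    have ht : distinctN gems (m + 2) ≤ 1 :=
      le_trans (distinctN_le_total gems (m + 2)) hK
    rw [if_neg (by exact_mod_cast Nat.not_lt.mpr ht)]

theorem aAbs_high (gems : List String) (hK : 2 ≤ distinctN gems gems.length) {d : Nat}
    (hd : cSpec gems + d < gems.length) :
    aAbs gems (cSpec gems + d) =
      ([(bestF gems (cSpec gems) d).1 + 1, (bestF gems (cSpec gems) d).2 + 1],
        (distinctN gems gems.length : Int)) := by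
  have hne : gems ≠ [] := by intro hc; rw [hc] at hd; simp at hd
  induction d with
  | zero =>
    obtain ⟨k, hk⟩ : ∃ k, cSpec gems = k + 1 :=
      ⟨cSpec gems - 1, by have := cSpec_pos gems hne hK; omega⟩
    rw [Nat.add_zero] at *
    rw [hk]
    show aStep gems (k + 1) (aAbs gems k) = _
    unfold aStep
    have hdist : distinctN gems (k + 1 + 1) = distinctN gems gems.length := by
      rw [← hk]; exact distinctN_cSpec gems hne
    simp only [hdist]
    rw [if_pos (by exact_mod_cast hK)]
    have hgl := aAbs_gl gems (m := k) (by omega)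
    have hcond : (aAbs gems k).2 < (distinctN gems gems.length : Int) := by
      rw [hgl]
      have h1 : distinctN gems (k + 1) < distinctN gems gems.length := by
        have := distinctN_cSpec_lt gems hne hK
        rw [hk] at this
        exact this
      split
      · omega
      · exact_mod_cast h1
    rw [if_pos (Or.inl hcond)]
    rw [← hk]
    rfl
  | succ d ih =>
    have ih := ih (by omega)
    rw [show cSpec gems + (d + 1) = (cSpec gems + d) + 1 by omega]
    show aStep gems (cSpec gems + d + 1) (aAbs gems (cSpec gems + d)) = _
    rw [ih]
    unfold aStep
    have hdist : distinctN gems (cSpec gems + d + 1 + 1) = distinctN gems gems.length :=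
      distinctN_eq_of_cSpec_le gems hne (by omega)
    simp only [hdist]
    rw [if_pos (by exact_mod_cast hK)]
    have hget1 : PySem.List.pyGetD
        [(bestF gems (cSpec gems) d).1 + 1, (bestF gems (cSpec gems) d).2 + 1] 1 0 =
        (bestF gems (cSpec gems) d).2 + 1 := by
      simp [PySem.List.pyGetD]
    have hget0 : PySem.List.pyGetD
        [(bestF gems (cSpec gems) d).1 + 1, (bestF gems (cSpec gems) d).2 + 1] 0 0 =
        (bestF gems (cSpec gems) d).1 + 1 := by
      simp [PySem.List.pyGetD]
    simp only [hget1, hget0]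
    have hKne : ¬ ((distinctN gems gems.length : Int) < (distinctN gems gems.length : Int)) := by omega
    by_cases hcnd : ((cSpec gems + d + 1 : Nat) : Int) - ((minIdx gems (cSpec gems + d + 1) : Nat) : Int) <
        (bestF gems (cSpec gems) d).2 - (bestF gems (cSpec gems) d).1
    · rw [if_pos (Or.inr (by omega))]
      show _ = ([(bestF gems (cSpec gems) (d + 1)).1 + 1, (bestF gems (cSpec gems) (d + 1)).2 + 1], _)
      simp only [bestF]
      rw [show cSpec gems + (d + 1) = cSpec gems + d + 1 by omega]
      rw [if_pos hcnd]
    · rw [if_neg (by push_neg; exact ⟨by omega, by omega⟩)]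
      show _ = ([(bestF gems (cSpec gems) (d + 1)).1 + 1, (bestF gems (cSpec gems) (d + 1)).2 + 1], _)
      simp only [bestF]
      rw [show cSpec gems + (d + 1) = cSpec gems + d + 1 by omega]
      rw [if_neg hcnd]

theorem solution_eq_aAbs (gems : List String) (h : gems ≠ []) :
    solution gems = (aAbs gems (gems.length - 1)).1 := by
  have hlen : 1 ≤ gems.length := List.length_pos_of_ne_nil h
  have htake : gems.take (gems.length - 1 + 1) = gems := by
    rw [show gems.length - 1 + 1 = gems.length by omega, List.take_length]
  have := aAbs_spec gems (m := gems.length - 1) (by omega)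
  rw [htake] at this
  show ((PySem.List.enumerate gems 0).foldl aBody ([1, 1], PySem.Dict.empty, 0)).1 = _
  rw [this]

theorem cSpec_eq_zero (gems : List String) (h : gems ≠ [])
    (hK : distinctN gems gems.length ≤ 1) : cSpec gems = 0 := by
  by_contra hc
  have := (cSpec_spec gems h).2.2 0 (by omega)
  rw [distinctN_one gems h] at this
  have := distinctN_pos gems h
  omega

theorem allEq (gems : List String) (h : gems ≠ []) (hK : distinctN gems gems.length ≤ 1)
    {j : Nat} (hj : j < gems.length) : gems.getD j "" = gems.getD 0 "" := by
  have h1 : (PySem.Set.ofList gems).length = 1 := by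
    have := distinctN_pos gems h
    have h2 : distinctN gems gems.length = (PySem.Set.ofList gems).length := by
      unfold distinctN; rw [List.take_length]
    omega
  obtain ⟨x, hx⟩ := List.length_eq_one_iff.mp h1
  have hmem : ∀ g ∈ gems, g = x := by
    intro g hg
    have := (PySem.Set.mem_ofList gems g).mpr hg
    rw [hx] at this
    simpa using this
  have hlen : 0 < gems.length := by omega
  rw [List.getD_eq_getElem gems "" hj, List.getD_eq_getElem gems "" hlen]
  rw [hmem _ (List.getElem_mem _), hmem _ (List.getElem_mem _)]

theorem minIdx_eq_self (gems : List String) (h : gems ≠ [])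
    (hK : distinctN gems gems.length ≤ 1) {i : Nat} (hi : i < gems.length) :
    minIdx gems i = i := by
  rcases Nat.lt_or_ge (minIdx gems i) i with hlt | hge
  · exfalso
    have h1 := lt_nxtSpec_minIdx gems i hi
    have h2 : nxtSpec gems (minIdx gems i) ≤ minIdx gems i + 1 := by
      apply nxtSpec_le_of_eq gems (by omega) (by omega)
      exact (allEq gems h hK (by omega)).trans (allEq gems h hK (j := minIdx gems i + 1) (by omega)).symm
    omega
  · have := minIdx_le gems i hi
    omega

theorem bestF_const (gems : List String) (h : gems ≠ [])
    (hK : distinctN gems gems.length ≤ 1) {d : Nat} (hd : d < gems.length) :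
    bestF gems (cSpec gems) d = (0, 0) := by
  rw [cSpec_eq_zero gems h hK]
  induction d with
  | zero =>
    simp only [bestF]
    rw [minIdx_eq_self gems h hK (by omega)]
    rfl
  | succ d ih =>
    simp only [bestF]
    rw [ih (by omega)]
    rw [minIdx_eq_self gems h hK (i := 0 + (d + 1)) (by omega)]
    norm_num

def nxtList (gems : List String) : List Int :=
  (List.range gems.length).map (fun j => ((nxtSpec gems j : Nat) : Int))

theorem shrinkLeft_spec (gems : List String) {i l0 : Nat} (hi : i < gems.length)
    (h1 : l0 ≤ minIdx gems i) (h2 : ∀ j < l0, nxtSpec gems j ≤ i) {fuel : Nat}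
    (hf : minIdx gems i - l0 < fuel) :
    shrinkLeft (nxtList gems) (i : Int) (l0 : Int) fuel = ((minIdx gems i : Nat) : Int) := by
  induction fuel generalizing l0 with
  | zero => omega
  | succ f ih =>
    unfold shrinkLeft
    have hl0n : l0 < gems.length := by have := minIdx_le gems i hi; omega
    have hget : PySem.List.pyGetD (nxtList gems) (l0 : Int) 0 = ((nxtSpec gems l0 : Nat) : Int) := by
      rw [PySem.List.pyGetD_natCast]
      exact PySem.List.getD_map_range _ _ _ _ hl0n
    rw [hget]
    rcases Nat.eq_or_lt_of_le h1 with heq | hlt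
    · rw [if_neg (by have := lt_nxtSpec_minIdx gems i hi; rw [heq]; push_cast; omega)]
      rw [heq]
    · rw [if_pos (by have := nxtSpec_le_of_lt_minIdx gems hi hlt; push_cast; omega)]
      rw [show ((l0 : Int) + 1) = ((l0 + 1 : Nat) : Int) by push_cast; ring]
      exact ih (by omega) (fun j hj => by
        rcases Nat.lt_or_ge j l0 with h | h
        · exact h2 j h
        · have : j = l0 := by omega
          rw [this]
          exact nxtSpec_le_of_lt_minIdx gems hi hlt) (by omega)

def bwBody (gems : List String) (st : List Int × PySem.Dict String Int) (j : Int) :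
    List Int × PySem.Dict String Int :=
  let g := PySem.List.pyGetD gems j ""
  (PySem.List.pySetD st.1 j (st.2.getD g (PySem.List.len gems)), st.2.insert g j)

def bwFold (gems : List String) : List Int × PySem.Dict String Int :=
  (PySem.List.pyRange (PySem.List.len gems - 1) (-1) (-1)).foldl (bwBody gems)
    (List.replicate gems.length (PySem.List.len gems), PySem.Dict.empty)

def bwInv (gems : List String) (t : Nat) (st : List Int × PySem.Dict String Int) : Prop :=
  st.1.length = gems.length ∧
  (∀ j : Nat, t ≤ j → j < gems.length → st.1.getD j 0 = ((nxtSpec gems j : Nat) : Int)) ∧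
  (∀ g : String, st.2.get? g =
      (PySem.List.index? (gems.drop t) g).map (fun k => ((t + k : Nat) : Int))) ∧
  st.2.keys.Nodup

theorem bwRec (gems : List String) (t : Nat) (ht : t ≤ gems.length)
    (st : List Int × PySem.Dict String Int) (hinv : bwInv gems t st) :
    bwInv gems 0 ((PySem.List.pyRange ((t : Int) - 1) (-1) (-1)).foldl (bwBody gems) st) := by
  induction t generalizing st with
  | zero =>
    rw [PySem.List.pyRange_neg_one_eq_nil (by omega)]
    exact hinv
  | succ t ih =>
    rw [show ((t + 1 : Nat) : Int) - 1 = (t : Int) by push_cast; ring]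
    rw [PySem.List.pyRange_neg_one_cons (by omega)]
    rw [List.foldl_cons]
    apply ih (by omega)
    obtain ⟨hlen, hnx, hfd, hnd⟩ := hinv
    have htlen : t < gems.length := by omega
    have hgetg : PySem.List.pyGetD gems (t : Int) "" = gems.getD t "" := by
      rw [PySem.List.pyGetD_natCast]
    have hdrop : gems.drop t = gems.getD t "" :: gems.drop (t + 1) := by
      rw [List.getD_eq_getElem gems "" htlen]
      exact (List.getElem_cons_drop htlen).symm
    have hgetD : st.2.getD (gems.getD t "") (PySem.List.len gems) = ((nxtSpec gems t : Nat) : Int) := by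
      rw [PySem.Dict.getD_eq_get?_getD, hfd]
      unfold nxtSpec
      cases hidx : PySem.List.index? (gems.drop (t + 1)) (gems.getD t "") with
      | none => simp [PySem.List.len_eq]
      | some k => simp
    refine ⟨?_, ?_, ?_, ?_⟩
    · show (PySem.List.pySetD st.1 (t : Int) _).length = _
      rw [hgetg, hgetD, PySem.List.pySetD_natCast]
      simp [hlen]
    · intro j hj hjlen
      show (PySem.List.pySetD st.1 (t : Int) _).getD j 0 = _
      rw [hgetg, hgetD, PySem.List.pySetD_natCast]
      rcases Nat.eq_or_lt_of_le hj with heq | hlt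
      · rw [← heq]
        rw [List.getD_eq_getElem?_getD, List.getElem?_set_self (by omega)]
        rfl
      · rw [List.getD_eq_getElem?_getD, List.getElem?_set_ne (by omega),
          ← List.getD_eq_getElem?_getD]
        exact hnx j (by omega) hjlen
    · intro g
      show (st.2.insert (PySem.List.pyGetD gems (t : Int) "") (t : Int)).get? g = _
      rw [hgetg, PySem.Dict.get?_insert]
      rw [hdrop]
      by_cases hgg : g = gems.getD t ""
      · rw [if_pos hgg, hgg, PySem.List.index?_cons_self]
        simp
      · rw [if_neg hgg, PySem.List.index?_cons_of_ne _ (fun hc => hgg hc.symm), hfd]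
        cases PySem.List.index? (gems.drop (t + 1)) g with
        | none => simp
        | some k => simp; push_cast; ring
    · show (st.2.insert (PySem.List.pyGetD gems (t : Int) "") (t : Int)).keys.Nodup
      exact PySem.Dict.nodup_keys_insert _ _ _ hnd

theorem bwFold_inv (gems : List String) : bwInv gems 0 (bwFold gems) := by
  unfold bwFold
  rw [PySem.List.len_eq]
  apply bwRec gems gems.length (le_refl _)
  refine ⟨by simp, fun j hj hjlen => by omega, fun g => ?_, PySem.Dict.nodup_keys_empty⟩
  rw [List.drop_length]
  simp [PySem.Dict.get?_empty, PySem.List.index?_eq_idxOf?]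

theorem bwFold_fst (gems : List String) : (bwFold gems).1 = nxtList gems := by
  obtain ⟨hlen, hnx, -, -⟩ := bwFold_inv gems
  apply List.ext_getElem
  · simp [hlen, nxtList]
  · intro j h1 h2
    have hj : j < gems.length := by rwa [hlen] at h1
    have := hnx j (by omega) hj
    rw [List.getD_eq_getElem?_getD, List.getElem?_eq_getElem h1] at this
    simp only [Option.getD_some] at this
    rw [this]
    simp [nxtList]

theorem firstD_get? (gems : List String) (g : String) :
    (bwFold gems).2.get? g =
      (PySem.List.index? gems g).map (fun k => ((k : Nat) : Int)) := by
  obtain ⟨-, -, hfd, -⟩ := bwFold_inv gems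
  rw [hfd]
  simp

theorem firstD_nodup (gems : List String) : (bwFold gems).2.keys.Nodup :=
  (bwFold_inv gems).2.2.2

theorem firstD_items_ne (gems : List String) (h : gems ≠ []) : (bwFold gems).2.items ≠ [] := by
  intro hc
  have hlen : 0 < gems.length := List.length_pos_of_ne_nil h
  have hmem : gems.getD 0 "" ∈ gems := by
    rw [List.getD_eq_getElem gems "" hlen]; exact List.getElem_mem _
  have hsome : (PySem.List.index? gems (gems.getD 0 "")).isSome :=
    (PySem.List.index?_isSome_iff _ _).mpr hmem
  obtain ⟨k, hk⟩ := Option.isSome_iff_exists.mp hsome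
  have := firstD_get? gems (gems.getD 0 "")
  rw [hk] at this
  have hnone : (bwFold gems).2.get? (gems.getD 0 "") = none := by
    rcases hd : (bwFold gems).2 with ⟨items⟩
    rw [hd] at hc
    simp at hc
    subst hc
    rfl
  rw [hnone] at this
  simp at this

theorem mem_values_iff (d : PySem.Dict String Int) (hnd : d.keys.Nodup) (v : Int) :
    v ∈ d.values ↔ ∃ g, d.get? g = some v := by
  have hvals : d.values = d.items.map (·.2) := rfl
  rw [hvals, List.mem_map]
  constructor
  · rintro ⟨p, hp, hpv⟩
    exact ⟨p.1, by rw [← hpv]; exact PySem.Dict.get?_of_mem_items _ (by rwa [← Prod.mk.eta (p := p)] at hp) hnd⟩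
  · rintro ⟨g, hg⟩
    exact ⟨(g, v), PySem.Dict.mem_items_of_get?_eq_some _ hg, rfl⟩

theorem firstD_max (gems : List String) (h : gems ≠ []) :
    PySem.List.max? (bwFold gems).2.values (fun v => v) = some ((cSpec gems : Nat) : Int) := by
  have hc := cSpec_lt gems h
  apply max?_id_eq_of_mem_of_le
  · rw [mem_values_iff _ (firstD_nodup gems)]
    refine ⟨gems.getD (cSpec gems) "", ?_⟩
    rw [firstD_get? gems]
    have hidx : PySem.List.index? gems (gems.getD (cSpec gems) "") = some (cSpec gems) := by
      rw [PySem.List.index?_eq_some_iff]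
      refine ⟨gems.take (cSpec gems), gems.drop (cSpec gems + 1), ?_, by simp [List.length_take]; omega,
        not_mem_take_cSpec gems h⟩
      rw [List.getD_eq_getElem gems "" hc]
      rw [List.getElem_cons_drop hc]
      exact (List.take_append_drop _ _).symm
    rw [hidx]
    rfl
  · intro y hy
    rw [mem_values_iff _ (firstD_nodup gems)] at hy
    obtain ⟨g, hg⟩ := hy
    rw [firstD_get? gems] at hg
    cases hidx : PySem.List.index? gems g with
    | none => rw [hidx] at hg; simp at hg
    | some k =>
      rw [hidx] at hg
      simp at hg
      obtain ⟨hkl, hget, -⟩ := PySem.List.getElem_of_index?_eq_some hidx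
      have hmem : g ∈ gems := by rw [← hget]; exact List.getElem_mem _
      have htake : g ∈ gems.take (cSpec gems + 1) :=
        mem_take_of_distinct_eq gems (distinctN_cSpec gems h) hmem
      have := index?_lt_of_mem_take hidx htake
      rw [← hg]
      exact_mod_cast Nat.lt_add_one_iff.mp this

def fwBody (gems : List String) (nxt : List Int) (st : Option (Int × Int) × Int) (i : Int) :
    Option (Int × Int) × Int :=
  let left := shrinkLeft nxt i st.2 (gems.length + 1)
  match st.1 with
  | none => (some (left, i), left)
  | some b => if i - left < b.2 - b.1 then (some (left, i), left) else (some b, left)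

theorem fw_spec (gems : List String) {d : Nat} (hd : cSpec gems + d < gems.length) :
    (PySem.List.pyRange ((cSpec gems : Nat) : Int) (((cSpec gems + d : Nat) : Int) + 1) 1).foldl
      (fwBody gems (nxtList gems)) (none, 0)
    = (some (bestF gems (cSpec gems) d), ((minIdx gems (cSpec gems + d) : Nat) : Int)) := by
  induction d with
  | zero =>
    rw [Nat.add_zero] at *
    rw [PySem.List.pyRange_one_singleton, List.foldl_cons, List.foldl_nil]
    unfold fwBody
    have hsh := shrinkLeft_spec gems (i := cSpec gems) (l0 := 0) hd
      (by omega) (by omega) (fuel := gems.length + 1) (by have := minIdx_le gems _ hd; omega)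
    rw [show ((0 : Nat) : Int) = (0 : Int) by rfl] at hsh
    rw [hsh]
    rfl
  | succ d ih =>
    have ih := ih (by omega)
    rw [show (((cSpec gems + (d + 1) : Nat) : Int) + 1) = ((((cSpec gems + d : Nat) : Int) + 1) + 1) by push_cast; ring]
    rw [PySem.List.pyRange_one_succ_right (by push_cast; omega), List.foldl_append, ih,
      List.foldl_cons, List.foldl_nil]
    unfold fwBody
    have hmono : minIdx gems (cSpec gems + d) ≤ minIdx gems (cSpec gems + d + 1) :=
      minIdx_mono gems (by omega)
    have hsh := shrinkLeft_spec gems (i := cSpec gems + d + 1) (l0 := minIdx gems (cSpec gems + d))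
      (by omega) hmono
      (fun j hj => by have := nxtSpec_le_of_lt_minIdx gems (i := cSpec gems + d) (by omega) hj; omega)
      (fuel := gems.length + 1) (by have := minIdx_le gems (cSpec gems + d + 1) (by omega); omega)
    rw [show (((cSpec gems + d : Nat) : Int) + 1) = ((cSpec gems + d + 1 : Nat) : Int) by push_cast; ring]
    rw [hsh]
    simp only
    by_cases hcnd : ((cSpec gems + d + 1 : Nat) : Int) - ((minIdx gems (cSpec gems + d + 1) : Nat) : Int) <
        (bestF gems (cSpec gems) d).2 - (bestF gems (cSpec gems) d).1
    · rw [if_pos hcnd]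
      show (some ((((minIdx gems (cSpec gems + d + 1) : Nat) : Int)), ((cSpec gems + d + 1 : Nat) : Int)), _) = _
      simp only [bestF]
      rw [show cSpec gems + (d + 1) = cSpec gems + d + 1 by omega]
      rw [if_pos hcnd]
    · rw [if_neg hcnd]
      show (some (bestF gems (cSpec gems) d), _) = _
      simp only [bestF]
      rw [show cSpec gems + (d + 1) = cSpec gems + d + 1 by omega]
      rw [if_neg hcnd]

theorem solution_alt_eq (gems : List String) (h : gems ≠ []) :
    solution_alt gems =
      [(bestF gems (cSpec gems) (gems.length - 1 - cSpec gems)).1 + 1,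
        (bestF gems (cSpec gems) (gems.length - 1 - cSpec gems)).2 + 1] := by
  have hc := cSpec_lt gems h
  have hrfl : solution_alt gems =
      (if (bwFold gems).2.items = [] then [1, 1]
       else
        match ((PySem.List.pyRange
            ((PySem.List.max? (bwFold gems).2.values (fun v => v)).getD 0)
            (PySem.List.len gems) 1).foldl
            (fwBody gems (bwFold gems).1) (none, 0)).1 with
        | some b => [b.1 + 1, b.2 + 1]
        | none => [1, 1]) := rfl
  rw [hrfl, if_neg (firstD_items_ne gems h), bwFold_fst, firstD_max gems h]
  simp only [Option.getD_some, PySem.List.len_eq]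
  rw [show (gems.length : Int) = (((cSpec gems + (gems.length - 1 - cSpec gems) : Nat) : Int) + 1) by push_cast; omega]
  rw [fw_spec gems (by omega)]

-- ===== final assembly =====
theorem solution_eq_target (gems : List String) (h : gems ≠ []) :
    solution gems =
      [(bestF gems (cSpec gems) (gems.length - 1 - cSpec gems)).1 + 1,
        (bestF gems (cSpec gems) (gems.length - 1 - cSpec gems)).2 + 1] := by
  have hn : 1 ≤ gems.length := List.length_pos_of_ne_nil h
  rw [solution_eq_aAbs gems h]
  rcases Nat.lt_or_ge (distinctN gems gems.length) 2 with hK | hK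
  · rw [bestF_const gems h (by omega) (by omega)]
    have := aAbs_low gems (m := gems.length - 1) (by omega) (by omega)
    rw [this]
    norm_num
  · have hc := cSpec_lt gems h
    have := aAbs_high gems hK (d := gems.length - 1 - cSpec gems) (by omega)
    rw [show cSpec gems + (gems.length - 1 - cSpec gems) = gems.length - 1 by omega] at this
    rw [this]

-- ===== VERDICT (by name: the statement is the Claim_ definition above) =====
theorem solution_spec : Claim_equal_solution := by
  intro gems _
  unfold Spec_solution
  by_cases h : gems = []
  · subst h; rfl
  · rw [solution_eq_target gems h, solution_alt_eq gems h]
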